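-- pv_equiv track=rewrite | github.com/tomsmith626/JaneStreetPuzzleOct24 | simple_optimising.py | functionFromPath
-- ===== SOURCE A (Python) =====
-- def functionFromPath(path, vars):
--     a, b, c = vars
--     values = {"A": a, "B": b, "C": c}
--     total = values[path[0]]
--     # set square to value not in the grid
--     oldSquare = 'D'
--     for square in path:
--         if square == oldSquare:
--             total += values[square]
--         else:
--             total *= values[square]
--         oldSquare = square
--     # constraint function, so this needs to equal 0
--     return (total - 2024)
-- ===== SOURCE B (Python) =====
-- def functionFromPath(path, triple):
--     a, b, c = triple
--     values = {"A": a, "B": b, "C": c}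
--     total = values[path[0]]
--     # run-length encode the path into consecutive (square, count) runs
--     runs = []
--     for square in path:
--         if runs and runs[-1][0] == square:
--             runs[-1][1] += 1
--         else:
--             runs.append([square, 1])
--     # one multiply per run, then count-1 additions folded into one term
--     for square, count in runs:
--         v = values[square]
--         total = total * v + (count - 1) * v
--     return total - 2024
-- ===== Notes on version B (the rewrite author's own statement) =====
-- stated objective: alternative
-- what changed: B run-length-encodes the path into (square,count) runs and evaluates each run with one multiply plus a single (count-1)*value addition, instead of A's per-step compare-with-previous loop.
import Mathlib
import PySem

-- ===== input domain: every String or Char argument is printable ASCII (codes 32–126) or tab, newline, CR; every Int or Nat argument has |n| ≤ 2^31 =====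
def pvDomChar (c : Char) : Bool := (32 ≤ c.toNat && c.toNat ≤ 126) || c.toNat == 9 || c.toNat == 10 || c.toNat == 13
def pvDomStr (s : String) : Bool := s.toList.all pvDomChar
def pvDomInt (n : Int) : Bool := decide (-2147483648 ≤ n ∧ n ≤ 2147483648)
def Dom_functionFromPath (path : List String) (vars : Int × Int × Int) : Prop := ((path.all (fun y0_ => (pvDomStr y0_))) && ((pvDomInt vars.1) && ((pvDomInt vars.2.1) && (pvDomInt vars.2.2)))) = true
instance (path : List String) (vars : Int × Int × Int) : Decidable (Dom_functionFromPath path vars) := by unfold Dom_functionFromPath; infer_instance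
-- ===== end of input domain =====

-- B run-length-encodes the path into (square, count) runs and evaluates one multiply + one (count-1)*value addition per run, instead of A's per-step compare-with-previous loop (alternative decomposition, same cost).


-- ===== PORT A =====
-- values = {"A": a, "B": b, "C": c}
def pvDictValues (vars : Int × Int × Int) : PySem.Dict String Int :=
  ((PySem.Dict.empty.insert "A" vars.1).insert "B" vars.2.1).insert "C" vars.2.2

def functionFromPath (path : List String) (vars : Int × Int × Int) : Int :=
  let values := pvDictValues vars
  -- total = values[path[0]]  (Pre_ guarantees the index and key exist, so getD's defaults are never used)
  let total : Int := PySem.Dict.getD values ((PySem.List.pyGet? path 0).getD "") 0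
  -- oldSquare = 'D'; for square in path: …
  let st := List.foldl (fun (s : Int × String) square =>
      (if square = s.2 then s.1 + PySem.Dict.getD values square 0
       else s.1 * PySem.Dict.getD values square 0, square)) (total, "D") path
  st.1 - 2024

-- ===== PORT B =====
-- Source B keeps runs in Python order and mutates the LAST entry; here the runs list is kept
-- head-first (head = last run) and reversed afterwards — a faithful functional transcription.
def pvAddRun (runs : List (String × Int)) (sq : String) : List (String × Int) :=
  match runs with
  | [] => [(sq, 1)]
  | (y, c) :: rest => if sq = y then (y, c + 1) :: rest else (sq, 1) :: (y, c) :: rest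

def functionFromPath_alt (path : List String) (vars : Int × Int × Int) : Int :=
  let values := pvDictValues vars
  let total : Int := PySem.Dict.getD values ((PySem.List.pyGet? path 0).getD "") 0
  let runs := (List.foldl pvAddRun [] path).reverse
  let final := List.foldl (fun (t : Int) (r : String × Int) =>
      t * PySem.Dict.getD values r.1 0 + (r.2 - 1) * PySem.Dict.getD values r.1 0) total runs
  final - 2024

-- ===== PRECONDITION & SPEC =====
-- Pre_ excludes exactly the inputs where Python A raises: the empty path (IndexError at
-- path[0]) and paths containing a square other than "A"/"B"/"C" (KeyError in values[square]).
def Pre_functionFromPath (path : List String) (vars : Int × Int × Int) : Prop :=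
  path ≠ [] ∧ ∀ s ∈ path, s = "A" ∨ s = "B" ∨ s = "C"
instance (path : List String) (vars : Int × Int × Int) : Decidable (Pre_functionFromPath path vars) := by unfold Pre_functionFromPath; infer_instance
def pvWitness_functionFromPath : List String × (Int × Int × Int) := (["A", "A", "B", "C"], (3, 5, 7))

def Spec_functionFromPath (path : List String) (vars : Int × Int × Int) (out : Int) : Prop := out = functionFromPath_alt path vars
instance (path : List String) (vars : Int × Int × Int) (out : Int) : Decidable (Spec_functionFromPath path vars out) := by unfold Spec_functionFromPath; infer_instance

-- ===== CLAIM (what is proved, stated in full; the proofs are below) =====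
def Claim_equal_functionFromPath : Prop := ∀ (path : List String) (vars : Int × Int × Int), Dom_functionFromPath path vars → Pre_functionFromPath path vars → Spec_functionFromPath path vars (functionFromPath path vars)

-- ===== LEMMAS AND PROOFS =====

-- reference evaluator: A's loop as structural recursion, abstracted over the value map
def pvRef (v : String → Int) (t : Int) (old : String) : List String → Int
  | [] => t
  | x :: xs => pvRef v (if x = old then t + v x else t * v x) x xs

lemma pvRef_foldA (v : String → Int) (xs : List String) : ∀ (t : Int) (old : String),
    (List.foldl (fun (s : Int × String) square =>
      (if square = s.2 then s.1 + v square else s.1 * v square, square)) (t, old) xs).1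
    = pvRef v t old xs := by
  induction xs with
  | nil => intro t old; simp [pvRef]
  | cons x xs ih => intro t old; simp [List.foldl, pvRef, ih]

-- B's run evaluation
def pvEvalRuns (v : String → Int) (rs : List (String × Int)) (t : Int) : Int :=
  List.foldl (fun (t : Int) (r : String × Int) => t * v r.1 + (r.2 - 1) * v r.1) t rs

lemma pvEvalRuns_append (v : String → Int) (l₁ l₂ : List (String × Int)) (t : Int) :
    pvEvalRuns v (l₁ ++ l₂) t = pvEvalRuns v l₂ (pvEvalRuns v l₁ t) := by
  simp [pvEvalRuns, List.foldl_append]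

-- key invariant: evaluating the reversed accumulator equals the reference evaluator
lemma pvRuns_invariant (v : String → Int) (xs : List String) :
    ∀ (y : String) (c : Int) (rest : List (String × Int)) (t : Int),
    pvEvalRuns v (List.foldl pvAddRun ((y, c) :: rest) xs).reverse t
    = pvRef v (pvEvalRuns v rest.reverse t * v y + (c - 1) * v y) y xs := by
  induction xs with
  | nil =>
    intro y c rest t
    simp [pvRef, pvEvalRuns]
  | cons x xs ih =>
    intro y c rest t
    simp only [List.foldl, pvAddRun]
    by_cases h : x = y
    · rw [if_pos h, ih]
      subst h
      simp only [pvRef]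
      rw [if_pos trivial]
      congr 1
      ring
    · rw [if_neg h, ih]
      simp only [pvRef, if_neg h, List.reverse_cons, pvEvalRuns_append]
      congr 1
      simp [pvEvalRuns]

-- both ports, abstracted over the value map, agree on a nonempty path whose head is not "D"
lemma pvMain (v : String → Int) (p : String) (ps : List String) (hpD : p ≠ "D") (t : Int) :
    (List.foldl (fun (s : Int × String) square =>
      (if square = s.2 then s.1 + v square else s.1 * v square, square)) (t, "D") (p :: ps)).1 - 2024
    = List.foldl (fun (t : Int) (r : String × Int) =>
        t * v r.1 + (r.2 - 1) * v r.1) t (List.foldl pvAddRun [] (p :: ps)).reverse - 2024 := by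
  rw [pvRef_foldA]
  have hA : pvRef v t "D" (p :: ps) = pvRef v (t * v p) p ps := by
    simp [pvRef, hpD]
  have hfold : List.foldl pvAddRun [] (p :: ps) = List.foldl pvAddRun [(p, 1)] ps := by
    simp [List.foldl, pvAddRun]
  rw [hA, hfold]
  have hB : pvEvalRuns v (List.foldl pvAddRun [(p, 1)] ps).reverse t = pvRef v (t * v p) p ps := by
    rw [pvRuns_invariant v ps p 1 [] t]
    norm_num [pvEvalRuns]
  calc pvRef v (t * v p) p ps - 2024
      = pvEvalRuns v (List.foldl pvAddRun [(p, 1)] ps).reverse t - 2024 := by rw [hB]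
    _ = _ := rfl

-- ===== VERDICT (by name: the statement is the Claim_ definition above) =====
theorem functionFromPath_spec : Claim_equal_functionFromPath := by
  intro path vars _ pre
  obtain ⟨hne, hmem⟩ := pre
  obtain ⟨p, ps, rfl⟩ := List.exists_cons_of_ne_nil hne
  have hpD : p ≠ "D" := by
    rcases hmem p (by simp) with h | h | h <;> simp [h]
  show _ = _
  unfold functionFromPath functionFromPath_alt
  simp only [PySem.List.pyGet?_zero_cons, Option.getD_some]
  exact pvMain (fun s => PySem.Dict.getD (pvDictValues vars) s 0) p ps hpD _
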